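-- pv_equiv track=rewrite | github.com/marco-zangari/code-katas | src/digits_avg.py | digitsaverage
-- ===== SOURCE A (Python) =====
-- def digitsaverage(d):
--     """Return the average of the digits until number is one digit.
--
--     input = integer
--     output = integer, single digit
--     ex. 246 = 4 i.e. avg of 2 and 4 is 3, average of 4 and 6 is 5
--         so after first iteration 246 => 35
--         avg of 3 and 5 is 4 so digitsAverage(246) returns 4
--     """
--     if not d:
--         return d
--     res = ''
--     if d < 10:
--         return d
--     else:
--         st_d = str(d)
--         for x in range(len(st_d) - 1):
--             z = st_d[x]
--             y = st_d[x + 1]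
--             float = (int(z) + int(y)) % len(z + y)
--             avg = ((int(z) + int(y)) // len(z + y)) + float
--             res += str(avg)
--         recurs = int(res)
--         return digitsaverage(recurs)
-- ===== SOURCE B (Python) =====
-- def digitsaverage(d):
--     """Iterative: while d has more than one digit, replace it by the number
--     formed by the ceiling-averages of each adjacent digit pair."""
--     while d >= 10:
--         s = str(d)
--         d = int(''.join(str((int(a) + int(b) + 1) // 2) for a, b in zip(s, s[1:])))
--     return d
-- ===== Notes on version B (the rewrite author's own statement) =====
-- stated objective: simpler
-- what changed: Replaces A's recursion with an explicit while-loop and builds each next number by zipping adjacent digits and joining their ceiling-averages ((a+b+1)//2) instead of indexing over range(len-1) and summing floor-quotient plus remainder.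
import Mathlib
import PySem

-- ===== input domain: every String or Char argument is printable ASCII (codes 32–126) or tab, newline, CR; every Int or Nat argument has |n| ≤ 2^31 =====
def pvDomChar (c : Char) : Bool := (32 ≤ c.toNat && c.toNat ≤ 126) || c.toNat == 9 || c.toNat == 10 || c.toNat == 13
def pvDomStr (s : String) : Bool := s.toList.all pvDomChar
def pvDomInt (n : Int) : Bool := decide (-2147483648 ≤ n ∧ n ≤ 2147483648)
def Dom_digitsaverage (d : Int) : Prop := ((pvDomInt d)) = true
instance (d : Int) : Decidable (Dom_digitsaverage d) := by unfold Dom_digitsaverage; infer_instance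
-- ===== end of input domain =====

-- B rewrites the recursive pairwise ceiling-average reduction as a simple iterative
-- while-loop building each next number from adjacent digit pairs (objective: simpler).

-- ===== PORT A =====
-- fuel is a totality guard only: each recursive call strictly decreases d (the next
-- value has one digit fewer), so d.toNat + 1 steps always suffice.
def digitsaverageGo : Nat → Int → Int
  | 0, d => d
  | Nat.succ fuel, d =>
    if d = 0 then d                       -- if not d: return d
    else if d < 10 then d
    else
      let st := PySem.Int.toChars d       -- st_d = str(d)
      let res := (PySem.List.pyRange 0 ((st.length : Int) - 1) 1).foldl
        (fun res x =>
          let z := [PySem.List.pyGetD st x ' ']          -- st_d[x]   (index always in range)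
          let y := [PySem.List.pyGetD st (x + 1) ' ']    -- st_d[x+1] (index always in range)
          let fl := PySem.Int.mod ((PySem.Int.ofChars? z).getD 0 + (PySem.Int.ofChars? y).getD 0)
                      ((z ++ y).length : Int)            -- (int(z)+int(y)) % len(z+y); int() always succeeds on a digit
          let avg := PySem.Int.floordiv ((PySem.Int.ofChars? z).getD 0 + (PySem.Int.ofChars? y).getD 0)
                      ((z ++ y).length : Int) + fl
          res ++ PySem.Int.toChars avg) ([] : List Char)
      digitsaverageGo fuel ((PySem.Int.ofChars? res).getD 0)   -- int(res) always succeeds: res nonempty, all digits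

def digitsaverage (d : Int) : Int := digitsaverageGo (d.toNat + 1) d

-- ===== PORT B =====
def digitsaverageAltStep (d : Int) : Int :=
  let s := PySem.Int.toChars d
  (PySem.Int.ofChars?
      (List.flatten ((s.zip (PySem.List.slice s (some 1) none)).map
        (fun p => PySem.Int.toChars
          (PySem.Int.floordiv ((PySem.Int.ofChars? [p.1]).getD 0 + (PySem.Int.ofChars? [p.2]).getD 0 + 1) 2))))).getD 0

-- fuel is a totality guard only (the while-loop variable strictly decreases)
def digitsaverageAltGo : Nat → Int → Int
  | 0, d => d
  | Nat.succ fuel, d => if 10 ≤ d then digitsaverageAltGo fuel (digitsaverageAltStep d) else d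

def digitsaverage_alt (d : Int) : Int := digitsaverageAltGo (d.toNat + 1) d

-- ===== PRECONDITION & SPEC =====
def Spec_digitsaverage (d : Int) (out : Int) : Prop := out = digitsaverage_alt d
instance (d : Int) (out : Int) : Decidable (Spec_digitsaverage d out) := by unfold Spec_digitsaverage; infer_instance

-- ===== CLAIM (what is proved, stated in full; the proofs are below) =====
def Claim_equal_digitsaverage : Prop := ∀ (d : Int), Dom_digitsaverage d → Spec_digitsaverage d (digitsaverage d)

-- ===== LEMMAS AND PROOFS =====

-- the index list of A's loop, paired, is the adjacent-pairs zip of B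
theorem dav_pairs (s : List Char) :
    (PySem.List.pyRange 0 ((s.length : Int) - 1) 1).map
      (fun x => (PySem.List.pyGetD s x ' ', PySem.List.pyGetD s (x + 1) ' '))
      = s.zip s.tail := by
  apply List.ext_getElem
  · simp [PySem.List.length_pyRange_one]
  · intro i h1 h2
    have hi : i < s.length - 1 := by
      simpa [PySem.List.length_pyRange_one] using h1
    have h0 : (0:Int) ≤ (i:Int) := by positivity
    simp only [List.getElem_map, PySem.List.getElem_pyRange_one, List.getElem_zip]
    have e1 : (0:Int) + (i:Int) = ((i:Nat):Int) := by omega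
    have e2 : (i:Int) + 1 = ((i+1:Nat):Int) := by push_cast; omega
    rw [e1, e2, PySem.List.pyGetD_natCast, PySem.List.pyGetD_natCast]
    have ht : s.tail[i]'(by simp [List.length_tail]; omega) = s[i+1]'(by omega) := by
      simp [List.getElem_tail]
    rw [List.getD_eq_getElem s ' ' (by omega), List.getD_eq_getElem s ' ' (by omega)]
    simp [ht]

theorem dav_go (fuel : Nat) (d : Int) :
    digitsaverageGo fuel d = digitsaverageAltGo fuel d := by
  induction fuel generalizing d with
  | zero => rfl
  | succ fuel ih =>
    by_cases h0 : d = 0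
    · simp [digitsaverageGo, digitsaverageAltGo, h0]
    · by_cases h10 : d < 10
      · have hn : ¬ (10 ≤ d) := by omega
        simp [digitsaverageGo, digitsaverageAltGo, h0, h10, hn]
      · rw [digitsaverageGo, digitsaverageAltGo]
        have hy : 10 ≤ d := by omega
        simp only [h0, h10, if_false, if_pos hy]
        rw [ih]
        congr 1
        unfold digitsaverageAltStep
        congr 2
        rw [PySem.List.foldl_append_eq_flatMap, List.nil_append, List.flatMap_def,
            PySem.List.slice_from_one, ← dav_pairs (PySem.Int.toChars d), List.map_map]
        congr 1
        apply List.map_congr_left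
        intro x hx
        simp only [Function.comp, List.length_append, List.length_cons, List.length_nil]
        norm_num
        congr 1
        omega

-- ===== VERDICT (by name: the statement is the Claim_ definition above) =====
theorem digitsaverage_spec : Claim_equal_digitsaverage := by
  intro d _
  show digitsaverage d = digitsaverage_alt d
  unfold digitsaverage digitsaverage_alt
  exact dav_go _ _
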